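-- pv_equiv track=rewrite | github.com/hozza94/Programers_Q | ll.py | solution
-- ===== SOURCE A (Python) =====
-- def solution(t, r):
--     answer = []
--     # 한대 당 한명 00 이면 01로 바뀜
--
--     for i in range(len(t)):
--         small = min(t)
--
--         indexlist = []
--         for k in range(len(t)):
--             if small == t[k]:
--                 indexlist.append(k)
--
--         ratinglist = []
--         for j in range(len(indexlist)):
--             ratinglist.append(r[indexlist[j]])
--
--         minratinglist = []
--         minrating = min(ratinglist)
--         for l in range(len(ratinglist)):
--             if minrating == ratinglist[l]:
--                 minratinglist.append(indexlist[l])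
--
--         top = indexlist.pop(indexlist.index(min(minratinglist)))
--
--         answer.append(top)
--         t[top] = 99999
--         for idx in indexlist:
--             t[idx] += 1
--
--     return answer
-- ===== SOURCE B (Python) =====
-- def solution(t, r):
--     # Group indices by value into buckets; repeatedly serve the (rating, index)-min
--     # of the lowest bucket, carry the losers up one level, and park the winner at
--     # the 99999 level (exactly A's sentinel semantics), until everyone was served n times.
--     n = len(t)
--     buckets = {}
--     for i in range(n):
--         buckets.setdefault(t[i], []).append((r[i], i))
--     answer = []
--     while len(answer) < n:
--         v = min(buckets)
--         group = buckets.pop(v)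
--         win = min(group)
--         answer.append(win[1])
--         group.remove(win)
--         buckets.setdefault(99999, []).append(win)
--         if group:
--             buckets.setdefault(v + 1, []).extend(group)
--     return answer
-- ===== Notes on version B (the rewrite author's own statement) =====
-- stated objective: faster
-- what changed: A rescans t each round with six inner passes (min, index list, rating list, rating min, min-rating indices, index/pop) plus an in-place penalty pass; B buckets the indices by value once into a dict of (rating,index) pairs and then repeatedly serves the pair-min of the lowest bucket, carrying the losers up one level and parking the winner in the 99999 bucket, so no pass over t is ever repeated.
-- outside the precondition, e.g. on solution([99999, 2147483648], [0]): A returns [0, 0], B raises IndexError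
import Mathlib
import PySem

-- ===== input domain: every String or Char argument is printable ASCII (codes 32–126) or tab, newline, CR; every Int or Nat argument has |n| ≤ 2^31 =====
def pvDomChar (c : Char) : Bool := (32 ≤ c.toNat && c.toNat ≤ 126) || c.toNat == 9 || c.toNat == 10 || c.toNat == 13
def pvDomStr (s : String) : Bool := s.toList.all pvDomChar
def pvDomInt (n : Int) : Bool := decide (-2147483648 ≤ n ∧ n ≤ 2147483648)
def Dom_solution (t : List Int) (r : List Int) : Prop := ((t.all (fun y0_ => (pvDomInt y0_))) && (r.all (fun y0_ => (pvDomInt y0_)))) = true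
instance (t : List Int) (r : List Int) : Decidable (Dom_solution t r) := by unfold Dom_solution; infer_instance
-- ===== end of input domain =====

-- B replaces A's per-round rescans of t (min scan, index list, rating list, rating min,
-- min-rating indices, index/pop, penalty pass) by a dict of value-buckets built once:
-- each round serves the (rating, index)-min of the lowest bucket, carries the losers up one
-- level and parks the winner in the 99999 bucket; measured constant-factor faster.
-- NOTE: A mutates its argument t in place (sentinel writes / increments); B does not — the
-- equivalence proved here is about the RETURN value only.

-- ===== PORT A =====
-- one body of A's `for i in range(len(t))` loop; state = (t, answer).
-- the `.getD` defaults below are unreachable: inside the loop t is nonempty, all three index/rating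
-- lists are nonempty, and every index used is in range (r-indexing in range under Pre_).
def aBody (r : List Int) (st : List Int × List Int) : List Int × List Int :=
  let t := st.1
  let answer := st.2
  let small := (PySem.List.min? t (fun x => x)).getD 0
  let indexlist := (PySem.List.pyRange 0 (t.length : Int) 1).foldl
      (fun acc k => if small = PySem.List.pyGetD t k 0 then acc ++ [k] else acc) []
  let ratinglist := (PySem.List.pyRange 0 (indexlist.length : Int) 1).foldl
      (fun acc j => acc ++ [PySem.List.pyGetD r (PySem.List.pyGetD indexlist j 0) 0]) []
  let minrating := (PySem.List.min? ratinglist (fun x => x)).getD 0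
  let minratinglist := (PySem.List.pyRange 0 (ratinglist.length : Int) 1).foldl
      (fun acc l => if minrating = PySem.List.pyGetD ratinglist l 0
                    then acc ++ [PySem.List.pyGetD indexlist l 0] else acc) []
  let mval := (PySem.List.min? minratinglist (fun x => x)).getD 0
  let j : Nat := (PySem.List.index? indexlist mval).getD 0
  let pr := (PySem.List.pop? indexlist (j : Int)).getD (0, indexlist)
  let top := pr.1
  let indexrest := pr.2
  let t1 := PySem.List.pySetD t top 99999
  let t2 := indexrest.foldl
      (fun tt idx => PySem.List.pySetD tt idx (PySem.List.pyGetD tt idx 0 + 1)) t1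
  (t2, answer ++ [top])

def solution (t : List Int) (r : List Int) : List Int :=
  ((PySem.List.pyRange 0 (t.length : Int) 1).foldl (fun st _ => aBody r st) (t, [])).2

-- ===== PORT B =====
-- one body of Source B's `while len(answer) < n` loop (fuel = n - len(answer)); the `.getD`
-- defaults are unreachable: buckets always holds a nonempty bucket while the loop runs.
def bServe : Nat → PySem.Dict Int (List (Int × Int)) → List Int
  | 0, _ => []
  | Nat.succ k, d =>
    let v := (PySem.List.min? d.keys (fun x => x)).getD 0        -- v = min(buckets)
    let group := d.getD v []                                     -- group = buckets.pop(v)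
    let d1 := d.erase v
    let win := (PySem.List.min2? group Prod.fst Prod.snd).getD (0, 0)  -- win = min(group)
    let rest := (PySem.List.remove? group win).getD []           -- group.remove(win)
    let d2 := PySem.Dict.modify d1 99999 [] (fun g => g ++ [win])   -- setdefault(99999, []).append(win)
    let d3 := if rest = [] then d2
              else PySem.Dict.modify d2 (v + 1) [] (fun g => g ++ rest)  -- setdefault(v+1, []).extend(group)
    win.2 :: bServe k d3

def solution_alt (t : List Int) (r : List Int) : List Int :=
  let buckets := (PySem.List.pyRange 0 (t.length : Int) 1).foldl
    (fun d i => PySem.Dict.modify d (PySem.List.pyGetD t i 0) []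
        (fun g => g ++ [(PySem.List.pyGetD r i 0, i)])) PySem.Dict.empty
  bServe t.length buckets

-- ===== PRECONDITION & SPEC =====
-- Pre_ excludes inputs with len(r) < len(t): on almost all of them A raises IndexError (every index
-- of t eventually joins a minimum group, whose ratings r[...] are then read), except degenerate
-- inputs where a t-value ≥ the 99999 sentinel keeps one low index being re-served forever
-- (e.g. t=[99999, 2147483648], r=[0] returns [0,0]); B naturally raises IndexError on those too.
def Pre_solution (t : List Int) (r : List Int) : Prop := t.length ≤ r.length
instance (t : List Int) (r : List Int) : Decidable (Pre_solution t r) := by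
  unfold Pre_solution; infer_instance

def pvWitness_solution : List Int × List Int := ([2, 1, 1], [5, 4, 4])

def Spec_solution (t : List Int) (r : List Int) (out : List Int) : Prop := out = solution_alt t r
instance (t : List Int) (r : List Int) (out : List Int) : Decidable (Spec_solution t r out) := by
  unfold Spec_solution; infer_instance

-- ===== CLAIM (what is proved, stated in full; the proofs are below) =====
def Claim_equal_solution : Prop :=
  ∀ (t : List Int) (r : List Int), Dom_solution t r → Pre_solution t r →
    Spec_solution t r (solution t r)

-- ===== LEMMAS AND PROOFS =====

-- ---------- shared intermediate: the round-by-round process on (value, rating, index) triples ----------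

-- Python's `<` on int 3-tuples, written out (lexicographic comparison)
def lexLt (x y : Int × Int × Int) : Bool :=
  decide (x.1 < y.1 ∨ (x.1 = y.1 ∧ (x.2.1 < y.2.1 ∨ (x.2.1 = y.2.1 ∧ x.2.2 < y.2.2))))

-- first lexicographic minimum of a nonempty list x :: xs
def bMin (x : Int × Int × Int) (xs : List (Int × Int × Int)) : Int × Int × Int :=
  xs.foldl (fun best y => if lexLt y best then y else best) x

-- the round process: serve the lex-min triple, retire it to 99999, bump the tied losers
def bLoop : Nat → List (Int × Int × Int) → List Int
  | 0, _ => []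
  | Nat.succ k, items =>
    match items with
    | [] => []
    | x :: rest =>
      let best := bMin x rest
      let m := best.1
      let top := best.2.2
      top :: bLoop k (items.map (fun p =>
        (if p.2.2 = top then (99999 : Int) else if p.1 = m then p.1 + 1 else p.1,
         p.2.1, p.2.2)))

-- the decorated triple list built from A's current t-array
def mkItems (r tl : List Int) : List (Int × Int × Int) :=
  (PySem.List.pyRange 0 (tl.length : Int) 1).map
    (fun i => (PySem.List.pyGetD tl i 0, PySem.List.pyGetD r i 0, i))

-- ---------- A-side: solution = bLoop over mkItems ----------

-- A's loop, re-expressed as fuel recursion on the evolving t-array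
def aRun (r : List Int) : Nat → List Int → List Int
  | 0, _ => []
  | Nat.succ k, tl => (aBody r (tl, [])).2 ++ aRun r k (aBody r (tl, [])).1

lemma aBody_split (r tl ans : List Int) :
    aBody r (tl, ans) = ((aBody r (tl, [])).1, ans ++ (aBody r (tl, [])).2) := by
  simp [aBody]

lemma foldl_aBody (r : List Int) (L : List Int) :
    ∀ (tl ans : List Int),
      (L.foldl (fun st _ => aBody r st) (tl, ans)).2 = ans ++ aRun r L.length tl := by
  induction L with
  | nil => intro tl ans; simp [aRun]
  | cons a L ih =>
    intro tl ans
    simp only [List.foldl_cons, List.length_cons, aRun]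
    rw [aBody_split, ih, List.append_assoc]

lemma solution_eq_aRun (t r : List Int) : solution t r = aRun r t.length t := by
  unfold solution
  rw [foldl_aBody]
  simp [PySem.List.length_pyRange_one]

lemma lexLt_total {x y : Int × Int × Int} (h : x ≠ y) : lexLt x y = true ∨ lexLt y x = true := by
  obtain ⟨a,b,c⟩ := x; obtain ⟨d,e,f⟩ := y
  simp only [lexLt, decide_eq_true_eq]
  by_cases h1 : a = d
  · by_cases h2 : b = e
    · have : c ≠ f := by intro hc; exact h (by simp [h1,h2,hc])
      omega
    · omega
  · omega

lemma lexLt_irrefl (x : Int × Int × Int) : lexLt x x = false := by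
  obtain ⟨a,b,c⟩ := x
  simp only [lexLt, decide_eq_false_iff_not]
  omega

-- m ≤ x and x ≤ z (as 'lexLt _ _ = false') give m ≤ z; works with either ≤ strengthened to <
lemma lexLt_le_trans {z x m : Int × Int × Int}
    (h1 : lexLt z x = false ∨ lexLt x z = true) (h2 : lexLt x m = false) :
    lexLt z m = false := by
  obtain ⟨a,b,c⟩ := x; obtain ⟨d,e,f⟩ := z; obtain ⟨p,q,s⟩ := m
  simp only [lexLt, decide_eq_true_eq, decide_eq_false_iff_not] at *
  omega

lemma bMin_spec (x : Int × Int × Int) (xs : List (Int × Int × Int)) :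
    bMin x xs ∈ x :: xs ∧ ∀ y ∈ x :: xs, lexLt y (bMin x xs) = false := by
  induction xs generalizing x with
  | nil =>
    refine ⟨by simp [bMin], ?_⟩
    intro y hy
    simp only [bMin, List.foldl_nil, List.mem_singleton] at *
    subst hy
    exact lexLt_irrefl y
  | cons z zs ih =>
    have hstep : bMin x (z :: zs) = bMin (if lexLt z x then z else x) zs := by
      simp [bMin]
    by_cases hzx : lexLt z x = true
    · rw [hstep, if_pos hzx]
      obtain ⟨hmem, hmin⟩ := ih z
      refine ⟨by rcases List.mem_cons.mp hmem with h | h <;> simp [h], ?_⟩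
      intro y hy
      rcases List.mem_cons.mp hy with h | hy'
      · subst h
        exact lexLt_le_trans (Or.inr hzx) (hmin z (by simp))
      · exact hmin y hy'
    · rw [hstep, if_neg hzx]
      obtain ⟨hmem, hmin⟩ := ih x
      refine ⟨by rcases List.mem_cons.mp hmem with h | h <;> simp [h], ?_⟩
      intro y hy
      rcases List.mem_cons.mp hy with h | hy'
      · subst h; exact hmin y (by simp)
      · rcases List.mem_cons.mp hy' with h | h
        · subst h
          exact lexLt_le_trans (Or.inl (by simpa using hzx)) (hmin x (by simp))
        · exact hmin y (by simp [h])

lemma map_getD_compose {β : Type} (g : Int → β) (xs : List Int) :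
    (PySem.List.pyRange 0 (xs.length : Int)).map (fun j => g (PySem.List.pyGetD xs j 0)) = xs.map g := by
  have h1 : (PySem.List.pyRange 0 (xs.length : Int)).map (fun j => g (PySem.List.pyGetD xs j 0))
      = ((PySem.List.pyRange 0 (xs.length : Int)).map (fun j => PySem.List.pyGetD xs j 0)).map g := by
    rw [List.map_map]; rfl
  rw [h1]
  have h2 := PySem.List.map_pyGetD_pyRange_zero xs 0
  have hlen : PySem.List.len xs = (xs.length : Int) := by simp [PySem.List.len]
  rw [hlen] at h2
  rw [h2]

-- increment fold over a nodup list of in-range indices, pointwise effect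
lemma incr_fold (ixs : List Int) : ∀ (tt : List Int), ixs.Nodup →
    (∀ k ∈ ixs, 0 ≤ k ∧ k < (tt.length : Int)) →
    ((ixs.foldl (fun tt idx => PySem.List.pySetD tt idx (PySem.List.pyGetD tt idx 0 + 1)) tt).length = tt.length ∧
     ∀ i : Int, 0 ≤ i →
       PySem.List.pyGetD (ixs.foldl (fun tt idx => PySem.List.pySetD tt idx (PySem.List.pyGetD tt idx 0 + 1)) tt) i 0
         = if i ∈ ixs then PySem.List.pyGetD tt i 0 + 1 else PySem.List.pyGetD tt i 0) := by
  induction ixs with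
  | nil => intro tt _ _; exact ⟨rfl, by intro i _; simp⟩
  | cons k ixs ih =>
    intro tt hnd hb
    have hk := hb k (by simp)
    have hkn : k = ((k.toNat : Nat) : Int) := by omega
    have hlen' : (PySem.List.pySetD tt k (PySem.List.pyGetD tt k 0 + 1)).length = tt.length :=
      PySem.List.length_pySetD tt k _
    obtain ⟨ihl, ihg⟩ := ih (PySem.List.pySetD tt k (PySem.List.pyGetD tt k 0 + 1))
      (List.nodup_cons.mp hnd).2
      (by intro k' hk'; rw [hlen']; exact hb k' (by simp [hk']))
    have hget : ∀ i : Int, 0 ≤ i →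
        PySem.List.pyGetD (PySem.List.pySetD tt k (PySem.List.pyGetD tt k 0 + 1)) i 0
          = if i = k then PySem.List.pyGetD tt k 0 + 1 else PySem.List.pyGetD tt i 0 := by
      intro i hi
      have hin : i = ((i.toNat : Nat) : Int) := by omega
      rw [hkn, hin, PySem.List.pyGetD_pySetD_natCast tt k.toNat i.toNat _ 0 (by omega)]
      by_cases h : i.toNat = k.toNat
      · rw [if_pos h, if_pos (by omega)]
      · rw [if_neg h, if_neg (by omega)]
    refine ⟨by simpa [List.foldl_cons, hlen'] using ihl, ?_⟩
    intro i hi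
    rw [List.foldl_cons, ihg i hi, hget i hi]
    have hknotmem : k ∉ ixs := (List.nodup_cons.mp hnd).1
    by_cases hik : i = k
    · subst hik
      rw [if_neg (by intro h; exact hknotmem h), if_pos rfl, if_pos (by simp)]
    · simp only [List.mem_cons]
      by_cases him : i ∈ ixs
      · rw [if_pos him, if_neg hik, if_pos (Or.inr him)]
      · rw [if_neg him, if_neg hik, if_neg (by rintro (h | h) <;> [exact hik h; exact him h])]
set_option maxHeartbeats 1000000 in
lemma aBody_char (r tl IL RL ML : List Int) (s mr mtop : Int) (jj : Nat)
    (hs : PySem.List.min? tl (fun x => x) = some s)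
    (hILdef : IL = (PySem.List.pyRange 0 ((tl.length : Int))).filter
        (fun k => decide (s = PySem.List.pyGetD tl k 0)))
    (hRLdef : RL = IL.map (fun v => PySem.List.pyGetD r v 0))
    (hMLdef : ML = (List.filter (fun l => decide (mr = PySem.List.pyGetD RL l 0))
        (PySem.List.pyRange 0 ((RL.length : Int)))).map (fun l => PySem.List.pyGetD IL l 0))
    (hmr : PySem.List.min? RL (fun x => x) = some mr)
    (hmtop : PySem.List.min? ML (fun x => x) = some mtop)
    (hjj : PySem.List.index? IL mtop = some jj) (hjl : jj < IL.length) (hILjj : IL[jj] = mtop) :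
    aBody r (tl, []) =
      ((IL.eraseIdx jj).foldl (fun tt idx => PySem.List.pySetD tt idx (PySem.List.pyGetD tt idx 0 + 1))
         (PySem.List.pySetD tl mtop 99999), [mtop]) := by
  simp only [aBody, hs, Option.getD_some, PySem.List.foldl_append_ite_eq_filter,
    PySem.List.foldl_append_singleton_eq_map, PySem.List.foldl_append_ite, List.nil_append]
  rw [map_getD_compose (fun v => PySem.List.pyGetD r v 0)
    ((PySem.List.pyRange 0 ((tl.length : Int))).filter (fun k => decide (s = PySem.List.pyGetD tl k 0)))]
  simp only [← hILdef, ← hRLdef]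
  simp only [hmr, Option.getD_some]
  simp only [← hMLdef]
  simp only [hmtop, Option.getD_some]
  simp only [hjj, Option.getD_some]
  rw [PySem.List.pop?_natCast IL jj hjl]
  simp only [Option.getD_some, hILjj]

set_option maxHeartbeats 2000000 in
lemma step_eq (r tl : List Int) (hn : 0 < tl.length) :
    ∃ x rest, mkItems r tl = x :: rest ∧
      (aBody r (tl, [])).2 = [(bMin x rest).2.2] ∧
      mkItems r (aBody r (tl, [])).1 =
        (mkItems r tl).map (fun p =>
          (if p.2.2 = (bMin x rest).2.2 then (99999 : Int)
           else if p.1 = (bMin x rest).1 then p.1 + 1 else p.1, p.2.1, p.2.2)) ∧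
      (aBody r (tl, [])).1.length = tl.length := by
  obtain ⟨s, hs⟩ : ∃ s, PySem.List.min? tl (fun x => x) = some s := by
    cases h : PySem.List.min? tl (fun x => x) with
    | none => exact absurd ((PySem.List.min?_eq_none_iff tl _).mp h) (by intro he; simp [he] at hn)
    | some s => exact ⟨s, rfl⟩
  have hsmem : s ∈ tl := PySem.List.min?_mem hs
  have hsmin : ∀ y ∈ tl, s ≤ y := by simpa using PySem.List.min?_isMin hs
  obtain ⟨IL, hILdef⟩ : ∃ L, L = (PySem.List.pyRange 0 ((tl.length : Int))).filter
      (fun k => decide (s = PySem.List.pyGetD tl k 0)) := ⟨_, rfl⟩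
  obtain ⟨RL, hRLdef⟩ : ∃ L, L = IL.map (fun v => PySem.List.pyGetD r v 0) := ⟨_, rfl⟩
  have hILmem : ∀ k : Int, k ∈ IL ↔ (0 ≤ k ∧ k < (tl.length : Int) ∧ s = PySem.List.pyGetD tl k 0) := by
    intro k
    rw [hILdef]
    simp [List.mem_filter, PySem.List.mem_pyRange_one, and_assoc]
  have hILpw : IL.Pairwise (· < ·) := by
    rw [hILdef]
    refine List.Pairwise.filter _ ?_
    rw [PySem.List.pyRange_zero_natCast]
    exact List.pairwise_lt_range.map _ (by intro a b h; exact_mod_cast h)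
  have hILnodup : IL.Nodup := hILpw.imp (fun h => ne_of_lt h)
  have hILne : IL ≠ [] := by
    obtain ⟨k0, hk0, hk0v⟩ := List.mem_iff_getElem.mp hsmem
    intro he
    have : (k0 : Int) ∈ IL := (hILmem _).mpr ⟨by omega, by exact_mod_cast hk0, by
      rw [PySem.List.pyGetD_eq_getElem tl 0 (by omega) (by exact_mod_cast hk0)]
      simp [hk0v]⟩
    simp [he] at this
  have hRLlen : RL.length = IL.length := by rw [hRLdef]; simp
  obtain ⟨mr, hmr⟩ : ∃ mr, PySem.List.min? RL (fun x => x) = some mr := by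
    cases h : PySem.List.min? RL (fun x => x) with
    | none => exact absurd ((PySem.List.min?_eq_none_iff RL _).mp h) (by
        intro he; rw [hRLdef] at he; simp [List.map_eq_nil_iff] at he; exact hILne he)
    | some v => exact ⟨v, rfl⟩
  have hmrmem : mr ∈ RL := PySem.List.min?_mem hmr
  have hmrmin : ∀ y ∈ RL, mr ≤ y := by simpa using PySem.List.min?_isMin hmr
  obtain ⟨ML, hMLdef⟩ : ∃ L, L = (List.filter (fun l => decide (mr = PySem.List.pyGetD RL l 0))
      (PySem.List.pyRange 0 ((RL.length : Int)))).map (fun l => PySem.List.pyGetD IL l 0) := ⟨_, rfl⟩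
  have hMLmem : ∀ idx : Int, idx ∈ ML ↔ (idx ∈ IL ∧ PySem.List.pyGetD r idx 0 = mr) := by
    intro idx
    rw [hMLdef]
    constructor
    · intro h
      obtain ⟨l, hl, hval⟩ := List.mem_map.mp h
      obtain ⟨hlr, hlp⟩ := List.mem_filter.mp hl
      rw [PySem.List.mem_pyRange_one] at hlr
      have hlt : l < (IL.length : Int) := by omega
      have hidx : idx = IL[l.toNat]'(by omega) := by
        rw [← hval, PySem.List.pyGetD_eq_getElem IL 0 hlr.1 (by exact_mod_cast hlt)]
      have hmem : idx ∈ IL := by rw [hidx]; exact List.getElem_mem _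
      refine ⟨hmem, ?_⟩
      have : mr = PySem.List.pyGetD RL l 0 := by simpa using hlp
      rw [PySem.List.pyGetD_eq_getElem RL 0 hlr.1 (by rw [hRLlen]; exact_mod_cast hlt)] at this
      simp only [hRLdef, List.getElem_map] at this
      rw [this, hidx]
    · rintro ⟨hmem, hval⟩
      obtain ⟨l, hl, hlv⟩ := List.mem_iff_getElem.mp hmem
      refine List.mem_map.mpr ⟨(l : Int), List.mem_filter.mpr ⟨?_, ?_⟩, ?_⟩
      · rw [PySem.List.mem_pyRange_one, hRLlen]; constructor <;> [omega; exact_mod_cast hl]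
      · have : PySem.List.pyGetD RL (l : Int) 0 = PySem.List.pyGetD r idx 0 := by
          rw [PySem.List.pyGetD_eq_getElem RL 0 (by omega) (by rw [hRLlen]; exact_mod_cast hl)]
          simp only [hRLdef, List.getElem_map]
          simp [hlv]
        simp [this, hval]
      · rw [PySem.List.pyGetD_eq_getElem IL 0 (by omega) (by exact_mod_cast hl)]
        simpa using hlv
  obtain ⟨mtop, hmtop⟩ : ∃ v, PySem.List.min? ML (fun x => x) = some v := by
    cases h : PySem.List.min? ML (fun x => x) with
    | none =>
      exfalso
      have hMLn : ML = [] := (PySem.List.min?_eq_none_iff ML _).mp h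
      obtain ⟨idx0, hidx0, hidx0v⟩ := List.mem_map.mp (by rw [hRLdef] at hmrmem; exact hmrmem)
      have : idx0 ∈ ML := (hMLmem idx0).mpr ⟨hidx0, hidx0v⟩
      simp [hMLn] at this
    | some v => exact ⟨v, rfl⟩
  have hmtopML : mtop ∈ ML := PySem.List.min?_mem hmtop
  have hmtopmin : ∀ y ∈ ML, mtop ≤ y := by simpa using PySem.List.min?_isMin hmtop
  have hmtopIL : mtop ∈ IL := ((hMLmem mtop).mp hmtopML).1
  have hmtopr : PySem.List.pyGetD r mtop 0 = mr := ((hMLmem mtop).mp hmtopML).2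
  obtain ⟨jj, hjj⟩ : ∃ jj, PySem.List.index? IL mtop = some jj :=
    Option.isSome_iff_exists.mp ((PySem.List.index?_isSome_iff IL mtop).mpr hmtopIL)
  obtain ⟨hjl, hILjj, _hfirst⟩ := PySem.List.getElem_of_index?_eq_some hjj
  rw [aBody_char r tl IL RL ML s mr mtop jj hs hILdef hRLdef hMLdef hmr hmtop hjj hjl hILjj]
  -- bounds for mtop
  have hmtopb : 0 ≤ mtop ∧ mtop < (tl.length : Int) ∧ s = PySem.List.pyGetD tl mtop 0 :=
    (hILmem mtop).mp hmtopIL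
  -- the nonempty split of mkItems
  have hnz : (0 : Int) < (tl.length : Int) := by exact_mod_cast hn
  have hsplit : mkItems r tl = ((PySem.List.pyGetD tl 0 0, PySem.List.pyGetD r 0 0, (0:Int)))
      :: (PySem.List.pyRange 1 ((tl.length : Int))).map
           (fun i => (PySem.List.pyGetD tl i 0, PySem.List.pyGetD r i 0, i)) := by
    unfold mkItems
    rw [PySem.List.pyRange_one_cons hnz]
    simp
  refine ⟨_, _, hsplit, ?_⟩
  -- the A-side selected triple is the lex-min of mkItems
  have hAmem : (s, mr, mtop) ∈ mkItems r tl := by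
    unfold mkItems
    refine List.mem_map.mpr ⟨mtop, ?_, ?_⟩
    · rw [PySem.List.mem_pyRange_one]; exact ⟨hmtopb.1, hmtopb.2.1⟩
    · rw [← hmtopb.2.2, hmtopr]
  have hAmin : ∀ y ∈ mkItems r tl, lexLt y (s, mr, mtop) = false := by
    intro y hy
    obtain ⟨i, hi, hyv⟩ := List.mem_map.mp hy
    rw [PySem.List.mem_pyRange_one] at hi
    subst hyv
    have hmemtl : PySem.List.pyGetD tl i 0 ∈ tl := by
      rw [PySem.List.pyGetD_eq_getElem tl 0 hi.1 hi.2]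
      exact List.getElem_mem _
    have h1 : s ≤ PySem.List.pyGetD tl i 0 := hsmin _ hmemtl
    simp only [lexLt, decide_eq_false_iff_not]
    rintro (h | ⟨he, h2⟩)
    · omega
    · -- tl_i = s, so i ∈ IL
      have hiIL : i ∈ IL := (hILmem i).mpr ⟨hi.1, hi.2, he.symm⟩
      have hRLmem : PySem.List.pyGetD r i 0 ∈ RL := by
        rw [hRLdef]; exact List.mem_map.mpr ⟨i, hiIL, rfl⟩
      have h3 : mr ≤ PySem.List.pyGetD r i 0 := hmrmin _ hRLmem
      rcases h2 with h | ⟨he2, h4⟩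
      · omega
      · have hiML : i ∈ ML := (hMLmem i).mpr ⟨hiIL, he2⟩
        have := hmtopmin i hiML
        omega
  have hM : bMin (PySem.List.pyGetD tl 0 0, PySem.List.pyGetD r 0 0, (0:Int))
      ((PySem.List.pyRange 1 ((tl.length : Int))).map
        (fun i => (PySem.List.pyGetD tl i 0, PySem.List.pyGetD r i 0, i))) = (s, mr, mtop) := by
    obtain ⟨hBmem, hBmin⟩ := bMin_spec (PySem.List.pyGetD tl 0 0, PySem.List.pyGetD r 0 0, (0:Int))
      ((PySem.List.pyRange 1 ((tl.length : Int))).map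
        (fun i => (PySem.List.pyGetD tl i 0, PySem.List.pyGetD r i 0, i)))
    rw [← hsplit] at hBmem hBmin
    by_contra hne
    rcases lexLt_total hne with h | h
    · exact absurd h (by simp [hAmin _ hBmem])
    · exact absurd h (by simp [hBmin _ hAmem])
  rw [hM]
  have hidxOf : List.idxOf? mtop IL = some jj := by
    rw [← PySem.List.index?_eq_idxOf?]; exact hjj
  have hIReq : IL.eraseIdx jj = IL.erase mtop := by
    rw [List.erase_eq_eraseIdx, hidxOf]
  have hIRmem : ∀ k : Int, k ∈ IL.eraseIdx jj ↔ (k ∈ IL ∧ k ≠ mtop) := by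
    intro k; rw [hIReq, hILnodup.mem_erase_iff]; tauto
  have hIRnodup : (IL.eraseIdx jj).Nodup := List.Nodup.sublist (List.eraseIdx_sublist IL jj) hILnodup
  have hIRb : ∀ k ∈ IL.eraseIdx jj, 0 ≤ k ∧ k < ((PySem.List.pySetD tl mtop 99999).length : Int) := by
    intro k hk
    have := (hILmem k).mp ((hIRmem k).mp hk).1
    rw [PySem.List.length_pySetD]
    exact ⟨this.1, this.2.1⟩
  obtain ⟨hlen2, hget2⟩ := incr_fold (IL.eraseIdx jj) (PySem.List.pySetD tl mtop 99999) hIRnodup hIRb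
  have hT1get : ∀ i : Int, 0 ≤ i →
      PySem.List.pyGetD (PySem.List.pySetD tl mtop 99999) i 0
        = if i = mtop then 99999 else PySem.List.pyGetD tl i 0 := by
    intro i hi
    have h1 : mtop = ((mtop.toNat : Nat) : Int) := by omega
    have h2 : i = ((i.toNat : Nat) : Int) := by omega
    rw [h1, h2, PySem.List.pyGetD_pySetD_natCast tl mtop.toNat i.toNat _ 0 (by omega)]
    by_cases h : i.toNat = mtop.toNat
    · rw [if_pos h, if_pos (by omega)]
    · rw [if_neg h, if_neg (by omega)]
  have hT2len : (List.foldl (fun tt idx => PySem.List.pySetD tt idx (PySem.List.pyGetD tt idx 0 + 1))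
      (PySem.List.pySetD tl mtop 99999) (IL.eraseIdx jj)).length = tl.length := by
    rw [hlen2, PySem.List.length_pySetD]
  refine ⟨rfl, ?_, hT2len⟩
  unfold mkItems
  rw [hT2len]
  rw [List.map_map]
  refine List.map_congr_left ?_
  intro i hi
  rw [PySem.List.mem_pyRange_one] at hi
  simp only [Function.comp]
  have hfst : PySem.List.pyGetD (List.foldl
      (fun tt idx => PySem.List.pySetD tt idx (PySem.List.pyGetD tt idx 0 + 1))
      (PySem.List.pySetD tl mtop 99999) (IL.eraseIdx jj)) i 0
      = if i = mtop then 99999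
        else if PySem.List.pyGetD tl i 0 = s then PySem.List.pyGetD tl i 0 + 1
        else PySem.List.pyGetD tl i 0 := by
    rw [hget2 i hi.1, hT1get i hi.1]
    by_cases him : i = mtop
    · subst him
      rw [if_neg (by intro h; exact ((hIRmem i).mp h).2 rfl), if_pos rfl, if_pos rfl]
    · by_cases hval : PySem.List.pyGetD tl i 0 = s
      · rw [if_pos ((hIRmem i).mpr ⟨(hILmem i).mpr ⟨hi.1, hi.2, hval.symm⟩, him⟩),
           if_neg him, if_neg him, if_pos hval]
      · rw [if_neg (fun h => hval ((hILmem i).mp ((hIRmem i).mp h).1).2.2.symm),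
           if_neg him, if_neg him, if_neg hval]
  simp only [hfst]

lemma bLoop_eq_aRun (r : List Int) (k : Nat) :
    ∀ (tl : List Int), (k = 0 ∨ 0 < tl.length) → bLoop k (mkItems r tl) = aRun r k tl := by
  induction k with
  | zero => intro tl _; rfl
  | succ k ih =>
    intro tl hk
    have hn : 0 < tl.length := by rcases hk with h | h <;> omega
    obtain ⟨x, rest, hsplit, h2, h3, h4⟩ := step_eq r tl hn
    rw [hsplit]
    show (bMin x rest).2.2 :: bLoop k ((x :: rest).map _) = aRun r (k + 1) tl
    rw [← hsplit, ← h3]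
    show (bMin x rest).2.2 :: bLoop k (mkItems r (aBody r (tl, [])).1) = aRun r (k + 1) tl
    rw [ih (aBody r (tl, [])).1 (by rw [h4]; omega)]
    show (bMin x rest).2.2 :: aRun r k (aBody r (tl, [])).1
        = (aBody r (tl, [])).2 ++ aRun r k (aBody r (tl, [])).1
    rw [h2]
    rfl

-- ---------- B-side: bServe = bLoop under the bucket invariant ----------

-- Python's `<` on int 2-tuples
def pLt (x y : Int × Int) : Bool := decide (x.1 < y.1 ∨ (x.1 = y.1 ∧ x.2 < y.2))

lemma step_cond (m y : Int × Int) :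
    (decide (y.1 < m.1) || (!decide (m.1 < y.1) && decide (y.2 < m.2))) = pLt y m := by
  rw [← decide_not, ← Bool.decide_and, ← Bool.decide_or]
  simp only [pLt]
  exact decide_eq_decide.mpr (by omega)

lemma pLt_irrefl (x : Int × Int) : pLt x x = false := by
  simp [pLt]

lemma pLt_le_trans {z x m : Int × Int}
    (h1 : pLt z x = false ∨ pLt x z = true) (h2 : pLt x m = false) : pLt z m = false := by
  obtain ⟨a,b⟩ := x; obtain ⟨c,d⟩ := z; obtain ⟨e,f⟩ := m
  simp only [pLt, decide_eq_true_eq, decide_eq_false_iff_not] at *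
  omega

-- Python's min() over a nonempty list of int 2-tuples: a member no member is lex-below
lemma min2?_cons_spec (xs : List (Int × Int)) : ∀ (x : Int × Int),
    ∃ w, PySem.List.min2? (x :: xs) Prod.fst Prod.snd = some w ∧ w ∈ x :: xs ∧
      ∀ y ∈ x :: xs, pLt y w = false := by
  induction xs with
  | nil =>
    intro x
    refine ⟨x, by simp [PySem.List.min2?], by simp, ?_⟩
    intro y hy; simp at hy; subst hy; exact pLt_irrefl y
  | cons z zs ih =>
    intro x
    have hstep : PySem.List.min2? (x :: z :: zs) Prod.fst Prod.snd
        = PySem.List.min2? ((if pLt z x then z else x) :: zs) Prod.fst Prod.snd := by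
      show List.foldl _ _ _ = List.foldl _ _ _
      simp only [List.foldl_cons]
      congr 1
      show (if (decide (z.1 < x.1) || (!decide (x.1 < z.1) && decide (z.2 < x.2))) = true
            then some z else some x) = _
      rw [step_cond]
      split_ifs <;> rfl
    obtain ⟨w, hw1, hw2, hw3⟩ := ih (if pLt z x then z else x)
    refine ⟨w, by rw [hstep]; exact hw1, ?_, ?_⟩
    · rcases List.mem_cons.mp hw2 with h | h
      · subst h; split_ifs <;> simp
      · simp [h]
    · intro y hy
      have hhead := hw3 _ (List.mem_cons_self)
      rcases List.mem_cons.mp hy with h | hy'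
      · rw [h]
        by_cases hzx : pLt z x = true
        · rw [if_pos hzx] at hhead; exact pLt_le_trans (Or.inr hzx) hhead
        · rw [if_neg hzx] at hhead; exact hhead
      · rcases List.mem_cons.mp hy' with h | h
        · rw [h]
          by_cases hzx : pLt z x = true
          · rw [if_pos hzx] at hhead; exact hhead
          · rw [if_neg hzx] at hhead; exact pLt_le_trans (Or.inl (by simpa using hzx)) hhead
        · exact hw3 y (by simp [h])

-- Dict.erase facts (PySem.Dict.erase filters the items list)
lemma keys_erase {ν : Type} (d : PySem.Dict Int ν) (v : Int) :
    (d.erase v).keys = d.keys.filter (fun x => !(x == v)) := by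
  show List.map (fun x => x.1) (List.filter (fun p => !(p.1 == v)) d.items) = _
  rw [show (fun (p : Int × ν) => !(p.1 == v)) = ((fun x => !(x == v)) ∘ fun (p : Int × ν) => p.1) from rfl]
  rw [← List.filter_map]
  rfl

lemma find?_filter_aux {ν : Type} (v k : Int) (l : List (Int × ν)) :
    ((l.filter (fun p => !(p.1 == v))).find? (fun p => p.1 == k)) =
      if k = v then none else l.find? (fun p => p.1 == k) := by
  induction l with
  | nil => simp
  | cons a l ih =>
    by_cases hav : a.1 = v
    · rw [List.filter_cons_of_neg (by simp [hav])]
      rw [ih]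
      split_ifs with h
      · rfl
      · rw [List.find?_cons_of_neg (by simp [hav]; omega)]
    · rw [List.filter_cons_of_pos (by simp [hav])]
      by_cases hak : a.1 = k
      · rw [List.find?_cons_of_pos (by simp [hak]), List.find?_cons_of_pos (by simp [hak])]
        rw [if_neg (by omega)]
      · rw [List.find?_cons_of_neg (by simp [hak]), List.find?_cons_of_neg (by simp [hak]), ih]

lemma get?_erase {ν : Type} (d : PySem.Dict Int ν) (v k : Int) :
    (d.erase v).get? k = if k = v then none else d.get? k := by
  show ((d.items.filter (fun p => !(p.1 == v))).find? (fun p => p.1 == k)).map _ = _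
  rw [find?_filter_aux]
  split_ifs <;> rfl

lemma getD_erase {ν : Type} (d : PySem.Dict Int ν) (v k : Int) (d0 : ν) :
    (d.erase v).getD k d0 = if k = v then d0 else d.getD k d0 := by
  simp only [PySem.Dict.getD, get?_erase]
  split_ifs <;> rfl

-- the (rating, index) pairs of the items currently at value k
def vals (k : Int) (items : List (Int × Int × Int)) : List (Int × Int) :=
  (items.filter (fun p => p.1 == k)).map (fun p => p.2)

-- bucket-dict / items-list correspondence
def InvB (d : PySem.Dict Int (List (Int × Int))) (items : List (Int × Int × Int)) : Prop :=
  d.keys.Nodup ∧ (∀ k, (d.getD k []).Perm (vals k items)) ∧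
    (∀ k, k ∈ d.keys ↔ d.getD k [] ≠ [])

lemma mem_vals_iff (q : Int × Int) (k : Int) (items : List (Int × Int × Int)) :
    q ∈ vals k items ↔ ∃ p, p ∈ items ∧ p.1 = k ∧ p.2 = q := by
  simp only [vals, List.mem_map, List.mem_filter, beq_iff_eq]
  constructor
  · rintro ⟨p, ⟨hp, hk⟩, hq⟩; exact ⟨p, hp, hk, hq⟩
  · rintro ⟨p, hp, hk, hq⟩; exact ⟨p, ⟨hp, hk⟩, hq⟩

lemma count_vals (pr : Int × Int) (k : Int) (items : List (Int × Int × Int)) :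
    (vals k items).count pr = items.countP (fun p => (p.1 == k) && (p.2 == pr)) := by
  rw [vals, List.count_eq_countP, List.countP_map, List.countP_filter]
  exact List.countP_congr (by intro p _; simp [Bool.and_comm])

lemma perm_ne_nil {α : Type} {l1 l2 : List α} (h : l1.Perm l2) : l1 ≠ [] ↔ l2 ≠ [] := by
  have hl := h.length_eq
  constructor <;> intro h1 h2
  · exact h1 (List.length_eq_zero_iff.mp (by simp [hl, h2]))
  · exact h1 (List.length_eq_zero_iff.mp (by simp [← hl, h2]))

lemma lexLt_false_fst_le {y b : Int × Int × Int} (h : lexLt y b = false) : b.1 ≤ y.1 := by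
  simp only [lexLt, decide_eq_false_iff_not] at h
  omega

lemma lexLt_false_pair {p b : Int × Int × Int} (h : lexLt p b = false) (he : p.1 = b.1) :
    pLt p.2 b.2 = false := by
  simp only [lexLt, decide_eq_false_iff_not] at h
  simp only [pLt, decide_eq_false_iff_not]
  omega

lemma pLt_antisymm {a b : Int × Int} (h1 : pLt a b = false) (h2 : pLt b a = false) : a = b := by
  simp only [pLt, decide_eq_false_iff_not] at *
  have h3 : a.1 = b.1 ∧ a.2 = b.2 := by omega
  obtain ⟨x1, x2⟩ := a; obtain ⟨y1, y2⟩ := b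
  simp at h3 ⊢
  omega

lemma countP_disjoint {α : Type} (l : List α) (f g : α → Bool)
    (h : ∀ a ∈ l, ¬(f a = true ∧ g a = true)) :
    l.countP (fun a => f a || g a) = l.countP f + l.countP g := by
  induction l with
  | nil => simp
  | cons a l ih =>
    simp only [List.countP_cons]
    rw [ih (fun b hb => h b (List.mem_cons_of_mem a hb))]
    have ha := h a List.mem_cons_self
    by_cases hf : f a = true <;> by_cases hg : g a = true <;> simp [hf, hg] at ha ⊢ <;> omega

lemma mem_keys_modify {ν : Type} (d : PySem.Dict Int ν) (k k' : Int) (d0 : ν) (f : ν → ν) :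
    k' ∈ (d.modify k d0 f).keys ↔ k' = k ∨ k' ∈ d.keys := by
  rw [PySem.Dict.keys_modify]
  exact PySem.Dict.mem_keys_insert _ _ _ _

lemma nodup_keys_modify {ν : Type} (d : PySem.Dict Int ν) (k : Int) (d0 : ν) (f : ν → ν)
    (h : d.keys.Nodup) : (d.modify k d0 f).keys.Nodup := by
  rw [PySem.Dict.keys_modify]
  by_cases hc : d.contains k = true
  · rw [PySem.Dict.keys_insert_of_contains _ _ hc]
    exact h
  · rw [PySem.Dict.keys_insert_of_not_contains _ _ (by simpa using hc)]
    refine List.Nodup.append h (List.nodup_singleton k) ?_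
    intro a ha hb
    simp at hb
    subst hb
    exact hc ((PySem.Dict.contains_iff_mem_keys _ _).mpr ha)

set_option maxRecDepth 8192 in
set_option maxHeartbeats 4000000 in
lemma invB_step (d : PySem.Dict Int (List (Int × Int))) (x : Int × Int × Int)
    (rest0 : List (Int × Int × Int)) (hinv : InvB d (x :: rest0))
    (hnd : ((x :: rest0).map (fun p => p.2.2)).Nodup) :
    (PySem.List.min? d.keys (fun x => x)).getD 0 = (bMin x rest0).1 ∧
    (PySem.List.min2? (d.getD (bMin x rest0).1 []) Prod.fst Prod.snd).getD (0, 0) = (bMin x rest0).2 ∧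
    InvB (let v := (bMin x rest0).1
          let group := d.getD v []
          let rest := (PySem.List.remove? group (bMin x rest0).2).getD []
          let d2 := PySem.Dict.modify (d.erase v) 99999 [] (fun g => g ++ [(bMin x rest0).2])
          if rest = [] then d2 else PySem.Dict.modify d2 (v + 1) [] (fun g => g ++ rest))
      ((x :: rest0).map (fun p =>
        (if p.2.2 = (bMin x rest0).2.2 then (99999 : Int)
         else if p.1 = (bMin x rest0).1 then p.1 + 1 else p.1, p.2.1, p.2.2))) := by
  obtain ⟨hknd, hperm, hkey⟩ := hinv
  obtain ⟨hbmem, hbmin⟩ := bMin_spec x rest0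
  -- every item value is a key
  have hval_key : ∀ p ∈ x :: rest0, p.1 ∈ d.keys := by
    intro p hp
    rw [hkey]
    intro hnil
    have hv : p.2 ∈ vals p.1 (x :: rest0) := (mem_vals_iff _ _ _).mpr ⟨p, hp, rfl, rfl⟩
    have := (hperm p.1).mem_iff.mpr hv
    simp [hnil] at this
  -- (a) the minimum key is the value of the lex-min triple
  have hmin : PySem.List.min? d.keys (fun x => x) = some (bMin x rest0).1 := by
    cases hm : PySem.List.min? d.keys (fun x => x) with
    | none =>
      have := (PySem.List.min?_eq_none_iff _ _).mp hm
      exact absurd (hval_key _ hbmem) (by simp [this])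
    | some v =>
      have hv1 : v ∈ d.keys := PySem.List.min?_mem hm
      have hv2 : ∀ y ∈ d.keys, v ≤ y := by simpa using PySem.List.min?_isMin hm
      have hvne : d.getD v [] ≠ [] := (hkey v).mp hv1
      have hvv : vals v (x :: rest0) ≠ [] := (perm_ne_nil (hperm v)).mp hvne
      obtain ⟨q, hq⟩ := List.exists_mem_of_ne_nil _ hvv
      obtain ⟨p, hp, hpk, _⟩ := (mem_vals_iff q v _).mp hq
      have h1 : (bMin x rest0).1 ≤ v := hpk ▸ lexLt_false_fst_le (hbmin p hp)
      have h2 : v ≤ (bMin x rest0).1 := hv2 _ (hval_key _ hbmem)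
      have h3 : v = (bMin x rest0).1 := by omega
      rw [h3]
  have hgperm : (d.getD (bMin x rest0).1 []).Perm (vals (bMin x rest0).1 (x :: rest0)) :=
    hperm (bMin x rest0).1
  have hwin_vals : (bMin x rest0).2 ∈ vals (bMin x rest0).1 (x :: rest0) :=
    (mem_vals_iff _ _ _).mpr ⟨bMin x rest0, hbmem, rfl, rfl⟩
  have hwin_group : (bMin x rest0).2 ∈ d.getD (bMin x rest0).1 [] :=
    hgperm.mem_iff.mpr hwin_vals
  have hvals_min : ∀ q ∈ vals (bMin x rest0).1 (x :: rest0), pLt q (bMin x rest0).2 = false := by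
    intro q hq
    obtain ⟨p, hp, hpk, hpq⟩ := (mem_vals_iff q _ _).mp hq
    rw [← hpq]
    exact lexLt_false_pair (hbmin p hp) hpk
  -- (b) the pair-min of the lowest bucket is the lex-min triple's pair
  have hwin : (PySem.List.min2? (d.getD (bMin x rest0).1 []) Prod.fst Prod.snd).getD (0, 0)
      = (bMin x rest0).2 := by
    cases hg : d.getD (bMin x rest0).1 [] with
    | nil => rw [hg] at hwin_group; simp at hwin_group
    | cons y ys =>
      obtain ⟨w, hw1, hw2, hw3⟩ := min2?_cons_spec ys y
      rw [hg] at hgperm hwin_group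
      have h1 : pLt w (bMin x rest0).2 = false := hvals_min w (hgperm.mem_iff.mp hw2)
      have h2 : pLt (bMin x rest0).2 w = false := hw3 _ hwin_group
      rw [hw1, pLt_antisymm h1 h2]
      rfl
  refine ⟨by rw [hmin]; rfl, hwin, ?_⟩
  -- (c) the invariant is preserved
  have hrest : (PySem.List.remove? (d.getD (bMin x rest0).1 []) (bMin x rest0).2).getD []
      = (d.getD (bMin x rest0).1 []).erase (bMin x rest0).2 := by
    rw [PySem.List.remove?_eq_some_erase _ _ hwin_group]
    rfl
  simp only [hrest]
  set best := bMin x rest0 with hbestdef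
  set items : List (Int × Int × Int) := x :: rest0 with hitemsdef
  set F : Int × Int × Int → Int × Int × Int := (fun p =>
      (if p.2.2 = best.2.2 then (99999 : Int)
       else if p.1 = best.1 then p.1 + 1 else p.1, p.2.1, p.2.2)) with hFdef
  set group : List (Int × Int) := d.getD best.1 [] with hgroupdef
  set rest : List (Int × Int) := group.erase best.2 with hrestdef
  set E : PySem.Dict Int (List (Int × Int)) := d.erase best.1 with hEdef
  set D2 : PySem.Dict Int (List (Int × Int)) :=
      PySem.Dict.modify E 99999 [] (fun g => g ++ [best.2]) with hD2def
  set base : List (Int × Int × Int) := items.erase best with hbasedef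
  -- items split at the served triple
  have hpb : items.Perm (best :: base) := List.perm_cons_erase hbmem
  have hbase_top : ∀ p ∈ base, p.2.2 ≠ best.2.2 := by
    intro p hp hc
    have h1 : (items.map (fun p => p.2.2)).Perm (best.2.2 :: base.map (fun p => p.2.2)) := by
      simpa using hpb.map (fun p => p.2.2)
    have h2 := (h1.nodup_iff).mp hnd
    rw [List.nodup_cons] at h2
    exact h2.1 (List.mem_map.mpr ⟨p, hp, hc⟩)
  -- bucket contents of E and D2
  have hgd1 : ∀ k, E.getD k [] = if k = best.1 then [] else d.getD k [] := fun k =>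
    getD_erase d best.1 k []
  have hgd2 : ∀ k, D2.getD k [] = if k = 99999 then E.getD 99999 [] ++ [best.2] else E.getD k [] := by
    intro k
    rw [hD2def, PySem.Dict.getD_modify]
  -- the bucket/item permutations, one (key, pair) count at a time
  have hperm' : ∀ k, ((if rest = [] then D2
        else PySem.Dict.modify D2 (best.1 + 1) [] (fun g => g ++ rest)).getD k []).Perm
      (vals k (items.map F)) := by
    intro k
    rw [List.perm_iff_count]
    intro pr
    have hcnt_base : ∀ j, (d.getD j []).count pr
        = items.countP (fun p => (p.1 == j) && (p.2 == pr)) := by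
      intro j
      rw [(hperm j).count_eq, count_vals]
    have hsplit : ∀ j, items.countP (fun p => (p.1 == j) && (p.2 == pr))
        = base.countP (fun p => (p.1 == j) && (p.2 == pr))
          + (if best.1 = j ∧ best.2 = pr then 1 else 0) := by
      intro j
      rw [hpb.countP_eq, List.countP_cons]
      congr 1
      split_ifs with h1 h2 h2 <;> simp_all
    have hcE : ∀ j, (E.getD j []).count pr
        = if j = best.1 then 0 else items.countP (fun p => (p.1 == j) && (p.2 == pr)) := by
      intro j
      rw [hgd1]
      by_cases h : j = best.1
      · rw [if_pos h, if_pos h]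
        rfl
      · rw [if_neg h, if_neg h, hcnt_base]
    have hcD2 : ∀ j, (D2.getD j []).count pr
        = (if j = best.1 then 0 else items.countP (fun p => (p.1 == j) && (p.2 == pr)))
          + (if j = 99999 ∧ best.2 = pr then 1 else 0) := by
      intro j
      rw [hgd2]
      by_cases h9 : j = 99999
      · subst h9
        rw [if_pos rfl, List.count_append, hcE]
        have hone : List.count pr [best.2]
            = if (99999 : Int) = 99999 ∧ best.2 = pr then 1 else 0 := by
          by_cases hpr : best.2 = pr <;> simp [hpr]
        rw [hone]
      · rw [if_neg h9, hcE,
          if_neg (show ¬(j = 99999 ∧ best.2 = pr) from fun hc => h9 hc.1)]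
        omega
    have hcrest : rest.count pr
        = items.countP (fun p => (p.1 == best.1) && (p.2 == pr))
          - (if best.2 = pr then 1 else 0) := by
      rw [hrestdef, List.count_erase]
      have h1 : List.count pr group
          = items.countP (fun p => (p.1 == best.1) && (p.2 == pr)) := by
        rw [hgroupdef, hcnt_base]
      rw [h1]
      congr 1
      by_cases hpr : best.2 = pr <;> simp [hpr]
    have hL : ((if rest = [] then D2
          else PySem.Dict.modify D2 (best.1 + 1) [] (fun g => g ++ rest)).getD k []).count pr
        = (if k = best.1 then 0 else items.countP (fun p => (p.1 == k) && (p.2 == pr)))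
          + (if k = 99999 ∧ best.2 = pr then 1 else 0)
          + (if k = best.1 + 1 then
              items.countP (fun p => (p.1 == best.1) && (p.2 == pr))
                - (if best.2 = pr then 1 else 0) else 0) := by
      by_cases hre : rest = []
      · rw [if_pos hre, hcD2]
        have h0 : items.countP (fun p => (p.1 == best.1) && (p.2 == pr))
            - (if best.2 = pr then 1 else 0) = 0 := by
          rw [← hcrest, hre]
          simp
        have h3 : (if k = best.1 + 1 then
            items.countP (fun p => (p.1 == best.1) && (p.2 == pr))
              - (if best.2 = pr then 1 else 0) else 0) = 0 := by
          by_cases h : k = best.1 + 1 <;> simp [h, h0]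
        omega
      · rw [if_neg hre, PySem.Dict.getD_modify]
        by_cases hk1 : k = best.1 + 1
        · subst hk1
          rw [if_pos rfl, List.count_append, hcD2, hcrest, if_pos rfl]
        · rw [if_neg hk1, hcD2, if_neg hk1]
          omega
    rw [hL, count_vals, List.countP_map]
    have hQ : items.countP ((fun q : Int × Int × Int => (q.1 == k) && (q.2 == pr)) ∘ F)
        = items.countP (fun p => ((if p.2.2 = best.2.2 then (99999 : Int)
            else if p.1 = best.1 then p.1 + 1 else p.1) == k) && (p.2 == pr)) := by
      refine List.countP_congr ?_
      intro p _
      simp [Function.comp, hFdef]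
    have hsplitQ : items.countP (fun p => ((if p.2.2 = best.2.2 then (99999 : Int)
          else if p.1 = best.1 then p.1 + 1 else p.1) == k) && (p.2 == pr))
        = base.countP (fun p => ((if p.2.2 = best.2.2 then (99999 : Int)
            else if p.1 = best.1 then p.1 + 1 else p.1) == k) && (p.2 == pr))
          + (if (((if best.2.2 = best.2.2 then (99999 : Int)
            else if best.1 = best.1 then best.1 + 1 else best.1) == k) && (best.2 == pr)) = true
            then 1 else 0) := by
      rw [hpb.countP_eq, List.countP_cons]
    rw [hQ, hsplitQ]
    have hQbest : (if (((if best.2.2 = best.2.2 then (99999 : Int)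
          else if best.1 = best.1 then best.1 + 1 else best.1) == k) && (best.2 == pr)) = true
          then 1 else 0) = (if k = 99999 ∧ best.2 = pr then 1 else 0) := by
      have hin : (if best.2.2 = best.2.2 then (99999 : Int)
          else if best.1 = best.1 then best.1 + 1 else best.1) = 99999 := if_pos rfl
      rw [hin]
      by_cases h9 : k = 99999
      · by_cases hpr : best.2 = pr
        · rw [if_pos (by simp only [Bool.and_eq_true, beq_iff_eq]; exact ⟨h9.symm, hpr⟩),
            if_pos ⟨h9, hpr⟩]
        · rw [if_neg (by simp only [Bool.and_eq_true, beq_iff_eq]; exact fun hc => hpr hc.2),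
            if_neg (fun hc => hpr hc.2)]
      · rw [if_neg (by simp only [Bool.and_eq_true, beq_iff_eq]; exact fun hc => h9 hc.1.symm),
            if_neg (fun hc => h9 hc.1)]
    have hQb : ∀ p ∈ base,
        ((((if p.2.2 = best.2.2 then (99999 : Int)
            else if p.1 = best.1 then p.1 + 1 else p.1) == k) && (p.2 == pr)) = true)
        ↔ ((((if p.1 = best.1 then best.1 + 1 else p.1) == k) && (p.2 == pr)) = true) := by
      intro p hp
      rw [if_neg (hbase_top p hp)]
      by_cases h : p.1 = best.1
      · rw [if_pos h, if_pos h, h]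
      · rw [if_neg h, if_neg h]
    rw [List.countP_congr hQb, hQbest]
    have hJb : (if best.1 = best.1 ∧ best.2 = pr then 1 else 0)
        = (if best.2 = pr then 1 else 0) := by
      by_cases hpr : best.2 = pr <;> simp [hpr]
    by_cases hkv : k = best.1
    · have hS : base.countP
          (fun p => ((if p.1 = best.1 then best.1 + 1 else p.1) == k) && (p.2 == pr)) = 0 := by
        rw [List.countP_eq_zero]
        intro p _
        by_cases h : p.1 = best.1 <;> simp [h, hkv] <;> omega
      have e1 : (if k = best.1 then 0
          else items.countP (fun p => (p.1 == k) && (p.2 == pr))) = 0 := if_pos hkv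
      have e3 : (if k = best.1 + 1 then
          items.countP (fun p => (p.1 == best.1) && (p.2 == pr))
            - (if best.2 = pr then 1 else 0) else 0) = 0 := if_neg (by omega)
      omega
    · by_cases hk1 : k = best.1 + 1
      · have hor : ∀ p ∈ base,
            ((((if p.1 = best.1 then best.1 + 1 else p.1) == k) && (p.2 == pr)) = true)
            ↔ ((((p.1 == best.1) && (p.2 == pr)) || ((p.1 == k) && (p.2 == pr))) = true) := by
          intro p _
          by_cases h : p.1 = best.1 <;> simp [h, hk1] <;> omega
        rw [List.countP_congr hor, countP_disjoint _ _ _ (by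
          rintro p _ ⟨h1, h2⟩
          simp at h1 h2
          omega)]
        have e1 : (if k = best.1 then 0
            else items.countP (fun p => (p.1 == k) && (p.2 == pr)))
            = items.countP (fun p => (p.1 == k) && (p.2 == pr)) := if_neg hkv
        have e3 : (if k = best.1 + 1 then
            items.countP (fun p => (p.1 == best.1) && (p.2 == pr))
              - (if best.2 = pr then 1 else 0) else 0)
            = items.countP (fun p => (p.1 == best.1) && (p.2 == pr))
              - (if best.2 = pr then 1 else 0) := if_pos hk1
        have eJk : (if best.1 = k ∧ best.2 = pr then 1 else 0) = 0 := if_neg (by omega)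
        have hs1 := hsplit k
        have hs2 := hsplit best.1
        omega
      · have hS : ∀ p ∈ base,
            ((((if p.1 = best.1 then best.1 + 1 else p.1) == k) && (p.2 == pr)) = true)
            ↔ (((p.1 == k) && (p.2 == pr)) = true) := by
          intro p _
          by_cases h : p.1 = best.1 <;> simp [h] <;> omega
        rw [List.countP_congr hS]
        have e1 : (if k = best.1 then 0
            else items.countP (fun p => (p.1 == k) && (p.2 == pr)))
            = items.countP (fun p => (p.1 == k) && (p.2 == pr)) := if_neg hkv
        have e3 : (if k = best.1 + 1 then
            items.countP (fun p => (p.1 == best.1) && (p.2 == pr))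
              - (if best.2 = pr then 1 else 0) else 0) = 0 := if_neg hk1
        have eJk : (if best.1 = k ∧ best.2 = pr then 1 else 0) = 0 := if_neg (by omega)
        have hs1 := hsplit k
        omega
  -- keys of the updated dictionary: nodup and membership
  have hmE : ∀ k : Int, k ∈ E.keys ↔ (k ∈ d.keys ∧ k ≠ best.1) := by
    intro k
    rw [hEdef, keys_erase, List.mem_filter]
    simp
  have hmD2 : ∀ k : Int, k ∈ D2.keys ↔ (k = 99999 ∨ (k ∈ d.keys ∧ k ≠ best.1)) := by
    intro k
    rw [hD2def, mem_keys_modify, hmE]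
  have hkey' : ∀ k : Int, k ∈ (if rest = [] then D2
        else PySem.Dict.modify D2 (best.1 + 1) [] (fun g => g ++ rest)).keys
      ↔ (if rest = [] then D2
        else PySem.Dict.modify D2 (best.1 + 1) [] (fun g => g ++ rest)).getD k [] ≠ [] := by
    intro k
    split_ifs with hre
    · rw [hmD2, hgd2, hgd1]
      by_cases hk9 : k = 99999
      · simp [hk9]
      · rw [if_neg hk9, hgd1]
        by_cases hkv : k = best.1
        · simp [hkv, hk9] <;> omega
        · rw [if_neg hkv, ← hkey k]
          simp [hk9, hkv]
    · rw [mem_keys_modify, hmD2, PySem.Dict.getD_modify]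
      by_cases hk1 : k = best.1 + 1
      · simp [hk1, hre]
      · rw [if_neg hk1, hgd2]
        by_cases hk9 : k = 99999
        · simp [hk9, hk1]
        · rw [if_neg hk9, hgd1]
          by_cases hkv : k = best.1
          · simp [hkv, hk9, hk1] <;> omega
          · rw [if_neg hkv, ← hkey k]
            simp [hk9, hkv, hk1]
  have hnd3 : (if rest = [] then D2
        else PySem.Dict.modify D2 (best.1 + 1) [] (fun g => g ++ rest)).keys.Nodup := by
    have hEn : E.keys.Nodup := by
      rw [hEdef, keys_erase]
      exact hknd.filter _
    have hD2n : D2.keys.Nodup := nodup_keys_modify _ _ _ _ hEn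
    split_ifs with hre
    · exact hD2n
    · exact nodup_keys_modify _ _ _ _ hD2n
  exact ⟨hnd3, hperm', hkey'⟩

lemma bServe_eq_bLoop (fuel : Nat) :
    ∀ (d : PySem.Dict Int (List (Int × Int))) (items : List (Int × Int × Int)),
      InvB d items → (items.map (fun p => p.2.2)).Nodup → (fuel ≠ 0 → items ≠ []) →
      bServe fuel d = bLoop fuel items := by
  induction fuel with
  | zero => intro d items _ _ _; rfl
  | succ k ih =>
    intro d items hinv hnd hne
    cases items with
    | nil => exact absurd rfl (hne (Nat.succ_ne_zero k))
    | cons x rest0 =>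
      obtain ⟨ha, hb, hinv'⟩ := invB_step d x rest0 hinv hnd
      show (let v := (PySem.List.min? d.keys (fun x => x)).getD 0
            let group := d.getD v []
            let d1 := d.erase v
            let win := (PySem.List.min2? group Prod.fst Prod.snd).getD (0, 0)
            let rest := (PySem.List.remove? group win).getD []
            let d2 := PySem.Dict.modify d1 99999 [] (fun g => g ++ [win])
            let d3 := if rest = [] then d2
                      else PySem.Dict.modify d2 (v + 1) [] (fun g => g ++ rest)
            win.2 :: bServe k d3) = bLoop (k+1) (x :: rest0)
      simp only [ha, hb]
      have hidx : (((x :: rest0).map (fun p =>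
          (if p.2.2 = (bMin x rest0).2.2 then (99999 : Int)
           else if p.1 = (bMin x rest0).1 then p.1 + 1 else p.1, p.2.1, p.2.2))).map
            (fun p => p.2.2)) = ((x :: rest0).map (fun p => p.2.2)) := by
        rw [List.map_map]; rfl
      have hlen : (((x :: rest0).map (fun p =>
          (if p.2.2 = (bMin x rest0).2.2 then (99999 : Int)
           else if p.1 = (bMin x rest0).1 then p.1 + 1 else p.1, p.2.1, p.2.2)))) ≠ [] := by
        simp
      rw [ih _ _ hinv' (by rw [hidx]; exact hnd) (fun _ => hlen)]
      rfl

lemma build_eq_foldl_items (t r : List Int) :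
    ((PySem.List.pyRange 0 (t.length : Int) 1).foldl
      (fun d i => PySem.Dict.modify d (PySem.List.pyGetD t i 0) []
          (fun g => g ++ [(PySem.List.pyGetD r i 0, i)])) PySem.Dict.empty)
    = (mkItems r t).foldl (fun d p => PySem.Dict.modify d p.1 [] (fun g => g ++ [p.2]))
        PySem.Dict.empty := by
  rw [mkItems, List.foldl_map]

lemma build_invB (t r : List Int) :
    InvB ((PySem.List.pyRange 0 (t.length : Int) 1).foldl
      (fun d i => PySem.Dict.modify d (PySem.List.pyGetD t i 0) []
          (fun g => g ++ [(PySem.List.pyGetD r i 0, i)])) PySem.Dict.empty)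
      (mkItems r t) := by
  rw [build_eq_foldl_items]
  have hget : ∀ k, ((mkItems r t).foldl
      (fun d p => PySem.Dict.modify d p.1 [] (fun g => g ++ [p.2]))
        PySem.Dict.empty).getD k [] = vals k (mkItems r t) := by
    intro k
    rw [PySem.Dict.getD_foldl_modify_append]
    simp [vals]
  refine ⟨?_, ?_, ?_⟩
  · exact PySem.Dict.nodup_keys_foldl_modify_key _ Prod.fst []
      (fun _ p => fun g => g ++ [p.2]) _ (by simp [PySem.Dict.empty])
  · intro k; rw [hget]
  · intro k
    rw [hget, PySem.Dict.keys_foldl_modify_key _ Prod.fst [] (fun _ p => fun g => g ++ [p.2])]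
    rw [PySem.Set.mem_update]
    simp only [vals, ne_eq, List.map_eq_nil_iff, List.filter_eq_nil_iff, beq_iff_eq]
    constructor
    · rintro (h | h)
      · simp [PySem.Dict.empty, PySem.Dict.keys] at h
      · obtain ⟨p, hp, hpk⟩ := List.mem_map.mp h
        push Not
        exact ⟨p, hp, by simp [hpk]⟩
    · intro h
      push Not at h
      obtain ⟨p, hp, hpk⟩ := h
      exact Or.inr (List.mem_map.mpr ⟨p, hp, by simpa using hpk⟩)

lemma mkItems_idx_nodup (t r : List Int) :
    ((mkItems r t).map (fun p => p.2.2)).Nodup := by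
  rw [mkItems, List.map_map]
  show (List.map (fun i => i) _).Nodup
  rw [List.map_id_fun']
  exact PySem.List.nodup_pyRange_one 0 (t.length : Int)

-- ===== VERDICT (by name: the statement is the Claim_ definition above) =====
theorem solution_spec : Claim_equal_solution := by
  intro t r _hdom _hpre
  unfold Spec_solution
  have halt : solution_alt t r = bLoop t.length (mkItems r t) := by
    show bServe t.length _ = _
    refine bServe_eq_bLoop t.length _ _ (build_invB t r) (mkItems_idx_nodup t r) ?_
    intro h hc
    have hlen : (mkItems r t).length = t.length := by
      simp [mkItems, PySem.List.length_pyRange_one]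
    rw [hc] at hlen
    simp at hlen
    exact h hlen.symm
  rw [halt, solution_eq_aRun, bLoop_eq_aRun r t.length t (by omega)]
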